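-- pv_equiv track=rewrite | github.com/Nirjal22/FOCP | week6/week6Programs/num5.py | fun1
-- ===== SOURCE A (Python) =====
-- def fun1(entered_values):
--     randomStringToInsert = 'xy'
--     output=''
--     stringToInsert=''
--     for index,character in enumerate(entered_values):
--         if character==' ' or index==len(entered_values)-1:
--             stringToInsert=character
--         else:
--             stringToInsert=character+randomStringToInsert
--         output+=stringToInsert
--     return output
-- ===== SOURCE B (Python) =====
-- import re
--
-- def fun1(entered_values):
--     # One regex substitution: a non-space char with at least one char following
--     # it (DOTALL lookahead) gets 'xy' appended; the last char and spaces stay bare.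
--     return re.sub(r'([^ ])(?=.)', r'\1xy', entered_values, flags=re.DOTALL)
-- ===== Notes on version B (the rewrite author's own statement) =====
-- stated objective: idiomatic
-- what changed: Replaces the enumerate loop with index bookkeeping and string accumulation by a single regex substitution: r'([^ ])(?=.)' with DOTALL matches each non-space character that has a successor and re-emits it with 'xy' appended.
import Mathlib
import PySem

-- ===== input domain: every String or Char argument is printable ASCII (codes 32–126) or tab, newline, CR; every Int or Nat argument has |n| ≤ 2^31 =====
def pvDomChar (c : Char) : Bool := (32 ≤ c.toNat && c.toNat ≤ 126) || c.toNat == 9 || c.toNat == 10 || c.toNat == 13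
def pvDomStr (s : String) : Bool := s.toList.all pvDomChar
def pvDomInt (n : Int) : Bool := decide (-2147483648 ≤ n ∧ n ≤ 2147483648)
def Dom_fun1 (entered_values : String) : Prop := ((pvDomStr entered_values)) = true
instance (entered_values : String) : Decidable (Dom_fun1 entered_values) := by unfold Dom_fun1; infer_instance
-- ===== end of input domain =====

-- B replaces A's enumerate loop and index bookkeeping by one regex substitution,
-- re.sub(r'([^ ])(?=.)', r'\1xy', s, flags=re.DOTALL) (objective: idiomatic).

-- ===== PORT A =====
def fun1 (entered_values : String) : String :=
  let xs := entered_values.toList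
  String.ofList ((PySem.List.enumerate xs 0).foldl
    (fun output ic =>
      output ++ (if ic.2 == ' ' || ic.1 == (xs.length : Int) - 1 then [ic.2] else ic.2 :: ['x', 'y']))
    [])

-- ===== PORT B =====
-- Hand-ported regex scan (exact for this pattern): re.sub walks left to right; at a
-- position the pattern r'([^ ])(?=.)' (with DOTALL) matches iff the char is not ' '
-- AND a following char exists (the lookahead consumes nothing); on a match the char is
-- re-emitted with 'xy', otherwise the char is copied unchanged.
def fun1AltSub : List Char → List Char
  | [] => []
  | [c] => [c]                       -- lookahead (?=.) fails at the last char
  | c :: c' :: rest =>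
      (if c == ' ' then [c] else [c, 'x', 'y']) ++ fun1AltSub (c' :: rest)

def fun1_alt (entered_values : String) : String :=
  String.ofList (fun1AltSub entered_values.toList)

-- ===== PRECONDITION & SPEC =====
def Spec_fun1 (entered_values : String) (out : String) : Prop := out = fun1_alt entered_values
instance (entered_values : String) (out : String) : Decidable (Spec_fun1 entered_values out) := by unfold Spec_fun1; infer_instance

-- ===== CLAIM (what is proved, stated in full; the proofs are below) =====
def Claim_equal_fun1 : Prop := ∀ (entered_values : String), Dom_fun1 entered_values → Spec_fun1 entered_values (fun1 entered_values)

-- ===== LEMMAS AND PROOFS =====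

lemma fun1_fold_eq (n : Int) :
    ∀ (xs : List Char) (k : Int) (acc : List Char), k + xs.length = n →
      (PySem.List.enumerate xs k).foldl
        (fun output ic =>
          output ++ (if ic.2 == ' ' || ic.1 == n - 1 then [ic.2] else ic.2 :: ['x', 'y']))
        acc
      = acc ++ fun1AltSub xs := by
  intro xs
  induction xs with
  | nil => intro k acc h; simp [PySem.List.enumerate_nil, fun1AltSub]
  | cons c rest ih =>
    intro k acc h
    cases rest with
    | nil =>
      have hk : k = n - 1 := by simp at h; omega
      subst hk
      simp [PySem.List.enumerate_cons, PySem.List.enumerate_nil, fun1AltSub]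
    | cons r rs =>
      have hk : (k == n - 1) = false := by
        simp only [List.length_cons] at h
        simp only [beq_eq_false_iff_ne, ne_eq]
        intro he; omega
      rw [PySem.List.enumerate_cons, List.foldl_cons]
      rw [ih (k + 1) _ (by simp at h ⊢; omega)]
      simp only [hk, Bool.or_false, fun1AltSub]
      by_cases hc : c = ' '
      · simp [hc]
      · have : (c == ' ') = false := by simp [hc]
        simp [this]

-- ===== VERDICT (by name: the statement is the Claim_ definition above) =====
theorem fun1_spec : Claim_equal_fun1 := by
  intro s _
  unfold Spec_fun1 fun1 fun1_alt
  simp only []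
  congr 1
  exact fun1_fold_eq (s.toList.length : Int) s.toList 0 [] (by simp)
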